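-- pv_equiv track=rewrite | github.com/kyende1/netforensics-ml | convert_arff_to_iscx_csv.py | _strip_leading_noise
-- ===== SOURCE A (Python) =====
-- def _strip_leading_noise(text: str) -> str:
--     """Remove leading blank/comment lines before @RELATION."""
--     lines = text.splitlines()
--     out = []
--     seen_relation = False
--     for ln in lines:
--         if not seen_relation:
--             s = ln.strip()
--             if not s or s.startswith("%"):  # ARFF comments start with %
--                 continue
--             # first meaningful line should be @RELATION
--             if s.upper().startswith("@RELATION"):
--                 seen_relation = True
--                 out.append(ln)
--             else:
--                 # If we hit non-empty non-comment non-@RELATION, keep it anyway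
--                 # (some files have extra headers); liac-arff may still fail.
--                 out.append(ln)
--         else:
--             out.append(ln)
--     return "\n".join(out)
-- ===== SOURCE B (Python) =====
-- def _strip_leading_noise(text: str) -> str:
--     """Remove leading blank/comment lines before @RELATION."""
--     lines = text.splitlines()
--
--     def _noise(ln):
--         s = ln.strip()
--         return not s or s.startswith("%")
--
--     def _is_relation(ln):
--         return ln.strip().upper().startswith("@RELATION")
--
--     idx = next((i for i, ln in enumerate(lines) if _is_relation(ln)), None)
--     if idx is None:
--         return "\n".join(ln for ln in lines if not _noise(ln))
--     prefix = [ln for ln in lines[:idx] if not _noise(ln)]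
--     return "\n".join(prefix + lines[idx:])
-- ===== Notes on version B (the rewrite author's own statement) =====
-- stated objective: simpler
-- what changed: Replaces the stateful seen_relation flag loop by locate-the-@RELATION-boundary then two segments: filter blank/comment lines only in the prefix before the first @RELATION line, keep the suffix verbatim.
import Mathlib
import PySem

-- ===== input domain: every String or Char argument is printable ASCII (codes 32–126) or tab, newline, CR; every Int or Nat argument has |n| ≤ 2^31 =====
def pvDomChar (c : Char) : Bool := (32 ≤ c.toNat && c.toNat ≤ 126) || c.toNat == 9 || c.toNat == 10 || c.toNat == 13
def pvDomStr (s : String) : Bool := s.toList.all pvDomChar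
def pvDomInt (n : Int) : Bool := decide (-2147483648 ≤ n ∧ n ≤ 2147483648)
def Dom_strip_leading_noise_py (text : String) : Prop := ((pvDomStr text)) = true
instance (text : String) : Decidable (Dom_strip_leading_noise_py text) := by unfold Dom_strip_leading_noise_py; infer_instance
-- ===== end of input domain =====

-- B replaces A's stateful seen_relation flag loop by a boundary search plus two segments (filtered prefix ++ verbatim suffix); objective: simpler.

-- ===== PORT A =====
-- A's for-loop over lines with accumulator `out` and flag `seen_relation`.
def pvALoop : List String → List String → Bool → List String
  | [], out, _ => out
  | ln :: rest, out, seen =>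
    if seen then pvALoop rest (out ++ [ln]) true
    else
      let s := PySem.Str.strip ln
      if s = "" ∨ PySem.Str.startswith s "%" = true then
        pvALoop rest out false
      else if PySem.Str.startswith (PySem.Str.upper s) "@RELATION" = true then
        pvALoop rest (out ++ [ln]) true
      else
        pvALoop rest (out ++ [ln]) false

def strip_leading_noise_py (text : String) : String :=
  PySem.Str.join "\n" (pvALoop (PySem.Str.splitlines text) [] false)

-- ===== PORT B =====
def pvNoise (ln : String) : Bool :=
  let s := PySem.Str.strip ln
  s = "" || PySem.Str.startswith s "%"

def pvIsRelation (ln : String) : Bool :=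
  PySem.Str.startswith (PySem.Str.upper (PySem.Str.strip ln)) "@RELATION"

def strip_leading_noise_py_alt (text : String) : String :=
  let lines := PySem.Str.splitlines text
  match lines.findIdx? pvIsRelation with
  | none => PySem.Str.join "\n" (lines.filter (fun ln => !pvNoise ln))
  | some i =>
      PySem.Str.join "\n" ((lines.take i).filter (fun ln => !pvNoise ln) ++ lines.drop i)

-- ===== PRECONDITION & SPEC =====
def Spec_strip_leading_noise_py (text : String) (out : String) : Prop := out = strip_leading_noise_py_alt text
instance (text : String) (out : String) : Decidable (Spec_strip_leading_noise_py text out) := by unfold Spec_strip_leading_noise_py; infer_instance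

-- ===== CLAIM (what is proved, stated in full; the proofs are below) =====
def Claim_equal_strip_leading_noise_py : Prop := ∀ (text : String), Dom_strip_leading_noise_py text → Spec_strip_leading_noise_py text (strip_leading_noise_py text)

-- ===== LEMMAS AND PROOFS =====

-- once the flag is set, A appends every remaining line
theorem pvALoop_true (lines out : List String) : pvALoop lines out true = out ++ lines := by
  induction lines generalizing out with
  | nil => simp [pvALoop]
  | cons ln rest ih => simp [pvALoop, ih]

-- A's loop body, re-expressed through B's two predicates (same conditions, Bool form)
theorem pvALoop_cons (ln : String) (rest out : List String) :
    pvALoop (ln :: rest) out false =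
      if pvNoise ln then pvALoop rest out false
      else if pvIsRelation ln then pvALoop rest (out ++ [ln]) true
      else pvALoop rest (out ++ [ln]) false := by
  simp only [pvALoop, pvNoise, pvIsRelation]
  by_cases h1 : PySem.Str.strip ln = "" <;>
    by_cases h2 : PySem.Str.startswith (PySem.Str.strip ln) "%" = true <;>
      simp [h1]

-- a blank/comment line never matches @RELATION
theorem pvNoise_not_rel (ln : String) (h : pvNoise ln = true) : pvIsRelation ln = false := by
  unfold pvNoise at h
  unfold pvIsRelation
  simp only [Bool.or_eq_true, decide_eq_true_eq] at h
  by_contra hrel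
  rw [Bool.not_eq_false, PySem.Str.startswith_eq, PySem.Chars.startswith_iff] at hrel
  rw [PySem.Str.toList_upper, PySem.Str.toList_strip] at hrel
  rcases h with h | h
  · have : (PySem.Str.strip ln).toList = [] := by rw [h]; rfl
    rw [PySem.Str.toList_strip] at this
    rw [this] at hrel
    simp [PySem.Chars.upper] at hrel
  · rw [PySem.Str.startswith_eq, PySem.Chars.startswith_iff, PySem.Str.toList_strip] at h
    obtain ⟨t, ht⟩ := h
    rw [← ht] at hrel
    obtain ⟨u, hu⟩ := hrel
    simp [PySem.Chars.upper] at hu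
    exact absurd hu.1 (by decide)

theorem pvALoop_false (lines out : List String) :
    pvALoop lines out false = out ++
      (match lines.findIdx? pvIsRelation with
       | none => lines.filter (fun ln => !pvNoise ln)
       | some i => (lines.take i).filter (fun ln => !pvNoise ln) ++ lines.drop i) := by
  induction lines generalizing out with
  | nil => simp [pvALoop]
  | cons ln rest ih =>
    rw [pvALoop_cons, List.findIdx?_cons]
    by_cases hn : pvNoise ln = true
    · rw [if_pos hn, pvNoise_not_rel ln hn, ih]
      cases hfind : rest.findIdx? pvIsRelation with
      | none => simp [hn]
      | some i => simp [hn]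
    · rw [Bool.not_eq_true] at hn
      rw [if_neg (by simp [hn])]
      by_cases hr : pvIsRelation ln = true
      · rw [if_pos hr, hr, pvALoop_true]
        simp
      · rw [Bool.not_eq_true] at hr
        rw [if_neg (by simp [hr]), hr, ih]
        cases hfind : rest.findIdx? pvIsRelation with
        | none => simp [hn]
        | some i => simp [hn]

-- ===== VERDICT (by name: the statement is the Claim_ definition above) =====
theorem strip_leading_noise_py_spec : Claim_equal_strip_leading_noise_py := by
  intro text _
  unfold Spec_strip_leading_noise_py strip_leading_noise_py strip_leading_noise_py_alt
  rw [pvALoop_false]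
  cases h : (PySem.Str.splitlines text).findIdx? pvIsRelation <;> simp [h]
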